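-- pv_equiv track=rewrite | github.com/willregelmann/git-mediate | git_mediate.py | find_overlapping_hunks
-- ===== SOURCE A (Python) =====
-- def find_overlapping_hunks(source_hunks, target_hunks):
--     """Find regions where hunks from both branches overlap."""
--     overlapping_regions = []
--
--     for source_start, source_end in source_hunks:
--         for target_start, target_end in target_hunks:
--             # Check if hunks overlap
--             overlap_start = max(source_start, target_start)
--             overlap_end = min(source_end, target_end)
--
--             if overlap_start <= overlap_end:
--                 overlapping_regions.append((overlap_start, overlap_end))
--
--     # Merge overlapping regions
--     if overlapping_regions:
--         overlapping_regions.sort()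
--         merged = [overlapping_regions[0]]
--
--         for start, end in overlapping_regions[1:]:
--             last_start, last_end = merged[-1]
--             if start <= last_end + 1:  # Adjacent or overlapping
--                 merged[-1] = (last_start, max(last_end, end))
--             else:
--                 merged.append((start, end))
--
--         return merged
--
--     return []
-- ===== SOURCE B (Python) =====
-- def _coverage(hunks):
--     """Merged, sorted coverage of a hunk list: disjoint intervals with gaps >= 2."""
--     ivs = sorted((s, e) for s, e in hunks if s <= e)
--     out = []
--     for s, e in ivs:
--         if out and s <= out[-1][1] + 1:
--             out[-1] = (out[-1][0], max(out[-1][1], e))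
--         else:
--             out.append((s, e))
--     return out
--
--
-- def find_overlapping_hunks(source_hunks, target_hunks):
--     """Find regions where hunks from both branches overlap."""
--     src = _coverage(source_hunks)
--     tgt = _coverage(target_hunks)
--     out = []
--     i = j = 0
--     while i < len(src) and j < len(tgt):
--         s = max(src[i][0], tgt[j][0])
--         e = min(src[i][1], tgt[j][1])
--         if s <= e:
--             out.append((s, e))
--         if src[i][1] < tgt[j][1]:
--             i += 1
--         else:
--             j += 1
--     return out
-- ===== Notes on version B (the rewrite author's own statement) =====
-- stated objective: faster
-- what changed: Instead of intersecting every source hunk with every target hunk and sorting+merging the O(n*m) pieces, B merges each side's hunks into its sorted disjoint coverage once and intersects the two coverages with a single two-pointer sweep.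
import Mathlib
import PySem

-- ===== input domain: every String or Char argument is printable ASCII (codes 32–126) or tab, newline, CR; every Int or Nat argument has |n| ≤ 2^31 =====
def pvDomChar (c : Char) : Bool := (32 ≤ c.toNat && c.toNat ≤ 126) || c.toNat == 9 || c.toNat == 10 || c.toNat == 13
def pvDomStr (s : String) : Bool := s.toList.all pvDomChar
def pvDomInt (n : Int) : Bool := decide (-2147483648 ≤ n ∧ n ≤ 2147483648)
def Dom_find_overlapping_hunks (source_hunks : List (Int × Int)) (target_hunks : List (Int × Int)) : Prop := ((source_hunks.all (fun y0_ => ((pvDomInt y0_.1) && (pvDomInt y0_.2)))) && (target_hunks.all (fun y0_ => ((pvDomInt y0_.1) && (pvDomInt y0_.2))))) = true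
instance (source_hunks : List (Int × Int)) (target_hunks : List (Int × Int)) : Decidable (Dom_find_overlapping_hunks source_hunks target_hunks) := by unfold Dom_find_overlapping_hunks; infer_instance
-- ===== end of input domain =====

-- B replaces A's all-pairs intersection (O(n*m) pieces, sorted then merged) by merging each
-- side's coverage once and intersecting the two coverages with a two-pointer sweep.

-- ===== PORT A =====
-- the `overlapping_regions.append(...)` double loop
def pvPairs (source_hunks : List (Int × Int)) (target_hunks : List (Int × Int)) : List (Int × Int) :=
  source_hunks.foldl (fun acc p =>
    target_hunks.foldl (fun acc2 q =>
      let overlap_start := max p.1 q.1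
      let overlap_end := min p.2 q.2
      if overlap_start ≤ overlap_end then acc2 ++ [(overlap_start, overlap_end)] else acc2) acc) []

-- the `merged[-1] = ...` / `merged.append(...)` loop body
def pvStepA (merged : List (Int × Int)) (se : Int × Int) : List (Int × Int) :=
  let last := merged.getLast!
  if se.1 ≤ last.2 + 1 then merged.dropLast ++ [(last.1, max last.2 se.2)] else merged ++ [se]

def find_overlapping_hunks (source_hunks : List (Int × Int)) (target_hunks : List (Int × Int)) : List (Int × Int) :=
  let overlapping_regions := pvPairs source_hunks target_hunks
  match PySem.List.sorted2 overlapping_regions Prod.fst Prod.snd with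
  | [] => []                                   -- `if overlapping_regions:` fails
  | r0 :: rest => rest.foldl pvStepA [r0]

-- ===== PORT B =====
-- `_coverage`: sort the non-empty hunks, then the out[-1]-updating loop
def pvStepB (out : List (Int × Int)) (se : Int × Int) : List (Int × Int) :=
  match out.getLast? with
  | some last => if se.1 ≤ last.2 + 1 then out.dropLast ++ [(last.1, max last.2 se.2)] else out ++ [se]
  | none => [se]

def pvCoverage (hunks : List (Int × Int)) : List (Int × Int) :=
  let ivs := PySem.List.sorted2 (hunks.filter (fun p => p.1 ≤ p.2)) Prod.fst Prod.snd
  ivs.foldl pvStepB []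

-- the two-pointer while loop over src/tgt
def pvSweep : List (Int × Int) → List (Int × Int) → List (Int × Int)
  | [], _ => []
  | _ :: _, [] => []
  | (a, b) :: S, (c, d) :: T =>
    let s := max a c
    let e := min b d
    let rest := if b < d then pvSweep S ((c, d) :: T) else pvSweep ((a, b) :: S) T
    if s ≤ e then (s, e) :: rest else rest
termination_by X Y => X.length + Y.length

def find_overlapping_hunks_alt (source_hunks : List (Int × Int)) (target_hunks : List (Int × Int)) : List (Int × Int) :=
  pvSweep (pvCoverage source_hunks) (pvCoverage target_hunks)

-- ===== PRECONDITION & SPEC =====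
def Spec_find_overlapping_hunks (source_hunks : List (Int × Int)) (target_hunks : List (Int × Int)) (out : List (Int × Int)) : Prop := out = find_overlapping_hunks_alt source_hunks target_hunks
instance (source_hunks : List (Int × Int)) (target_hunks : List (Int × Int)) (out : List (Int × Int)) : Decidable (Spec_find_overlapping_hunks source_hunks target_hunks out) := by unfold Spec_find_overlapping_hunks; infer_instance

-- ===== CLAIM (what is proved, stated in full; the proofs are below) =====
def Claim_equal_find_overlapping_hunks : Prop := ∀ (source_hunks : List (Int × Int)) (target_hunks : List (Int × Int)), Dom_find_overlapping_hunks source_hunks target_hunks → Spec_find_overlapping_hunks source_hunks target_hunks (find_overlapping_hunks source_hunks target_hunks)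

-- ===== LEMMAS AND PROOFS =====

-- `covP x L`: the integer x lies in some interval of L
def covP (x : Int) (L : List (Int × Int)) : Prop := ∃ p ∈ L, p.1 ≤ x ∧ x ≤ p.2

-- normal form: non-empty intervals, consecutive ones separated by a gap of ≥ 2
def pvNorm (L : List (Int × Int)) : Prop :=
  (∀ p ∈ L, p.1 ≤ p.2) ∧ L.IsChain (fun p q => p.2 + 2 ≤ q.1)

theorem covP_nil (x : Int) : covP x [] ↔ False := by simp [covP]

theorem covP_cons (p : Int × Int) (L : List (Int × Int)) (x : Int) :
    covP x (p :: L) ↔ (p.1 ≤ x ∧ x ≤ p.2) ∨ covP x L := by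
  unfold covP
  constructor
  · rintro ⟨q, hq, h1, h2⟩
    rcases List.mem_cons.mp hq with rfl | hq'
    · exact Or.inl ⟨h1, h2⟩
    · exact Or.inr ⟨q, hq', h1, h2⟩
  · rintro (⟨h1, h2⟩ | ⟨q, hq, h1, h2⟩)
    · exact ⟨p, by simp, h1, h2⟩
    · exact ⟨q, List.mem_cons_of_mem _ hq, h1, h2⟩

theorem covP_perm {L M : List (Int × Int)} (h : L.Perm M) (x : Int) : covP x L ↔ covP x M := by
  unfold covP
  constructor <;> rintro ⟨p, hp, h1, h2⟩ <;>
    exact ⟨p, by first | exact h.mem_iff.mp hp | exact h.mem_iff.mpr hp, h1, h2⟩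

theorem covP_filter (H : List (Int × Int)) (x : Int) :
    covP x (H.filter (fun p => p.1 ≤ p.2)) ↔ covP x H := by
  unfold covP
  constructor
  · rintro ⟨p, hp, h1, h2⟩; exact ⟨p, (List.mem_filter.mp hp).1, h1, h2⟩
  · rintro ⟨p, hp, h1, h2⟩; exact ⟨p, List.mem_filter.mpr ⟨hp, by simp; omega⟩, h1, h2⟩

theorem pvNorm_nil : pvNorm [] := ⟨by simp, by simp⟩

theorem pvNorm_tail {p : Int × Int} {L : List (Int × Int)} (h : pvNorm (p :: L)) : pvNorm L :=
  ⟨fun q hq => h.1 q (List.mem_cons_of_mem _ hq), h.2.tail⟩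

-- every point covered by the tail of a normal list lies ≥ 2 past the head's end
theorem pvNorm_cov_tail_ge : ∀ (L : List (Int × Int)) (a b x : Int),
    pvNorm ((a, b) :: L) → covP x L → b + 2 ≤ x := by
  intro L
  induction L with
  | nil => intro a b x _ h; rcases h with ⟨p, hp, _, _⟩; simp at hp
  | cons q t ih =>
    intro a b x hN hc
    rcases hc with ⟨p, hp, h1, h2⟩
    rcases List.mem_cons.mp hp with rfl | hpt
    · have := hN.2.rel_head
      omega
    · have hb2 : b + 2 ≤ q.1 := hN.2.rel_head
      have hq : q.1 ≤ q.2 := hN.1 q (by simp)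
      have := ih q.1 q.2 x
        ⟨fun r hr => hN.1 r (List.mem_cons_of_mem _ hr), hN.2.tail⟩
        ⟨p, hpt, h1, h2⟩
      omega

-- normal lists with the same covered points are equal
theorem pvNorm_unique : ∀ (L M : List (Int × Int)), pvNorm L → pvNorm M →
    (∀ x, covP x L ↔ covP x M) → L = M := by
  intro L
  induction L with
  | nil =>
    intro M _ hM hcov
    cases M with
    | nil => rfl
    | cons q t =>
      exfalso
      have : covP q.1 (q :: t) := ⟨q, by simp, le_refl _, hM.1 q (by simp)⟩
      rcases (hcov q.1).mpr this with ⟨p, hp, _, _⟩; simp at hp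
  | cons p L' ih =>
    intro M hL hM hcov
    obtain ⟨a, b⟩ := p
    cases M with
    | nil =>
      exfalso
      have hab : a ≤ b := hL.1 (a, b) (by simp)
      rcases (hcov a).mp ⟨(a, b), by simp, le_refl _, hab⟩ with ⟨q, hq, _, _⟩; simp at hq
    | cons q M' =>
      obtain ⟨c, d⟩ := q
      have hab : a ≤ b := hL.1 (a, b) (by simp)
      have hcd : c ≤ d := hM.1 (c, d) (by simp)
      have hamem : covP a ((c, d) :: M') := (hcov a).mp ⟨(a, b), by simp, le_refl _, hab⟩
      have hcmem : covP c ((a, b) :: L') := (hcov c).mpr ⟨(c, d), by simp, le_refl _, hcd⟩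
      have hac : a = c := by
        rcases hamem with ⟨p, hp, h1, h2⟩
        rcases hcmem with ⟨r, hr, h3, h4⟩
        rcases List.mem_cons.mp hp with rfl | hp'
        · rcases List.mem_cons.mp hr with rfl | hr'
          · omega
          · have := pvNorm_cov_tail_ge L' a b c hL ⟨r, hr', h3, h4⟩; omega
        · have := pvNorm_cov_tail_ge M' c d a hM ⟨p, hp', h1, h2⟩
          rcases List.mem_cons.mp hr with rfl | hr'
          · omega
          · have := pvNorm_cov_tail_ge L' a b c hL ⟨r, hr', h3, h4⟩; omega
      subst hac
      have hbd : b = d := by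
        by_contra hne
        rcases lt_or_gt_of_ne hne with hlt | hgt
        · have : covP (b + 1) ((a, d) :: M') := ⟨(a, d), by simp, by omega, by omega⟩
          rcases (hcov (b + 1)).mpr this with ⟨r, hr, h1, h2⟩
          rcases List.mem_cons.mp hr with rfl | hr'
          · omega
          · have := pvNorm_cov_tail_ge L' a b (b + 1) hL ⟨r, hr', h1, h2⟩; omega
        · have : covP (d + 1) ((a, b) :: L') := ⟨(a, b), by simp, by omega, by omega⟩
          rcases (hcov (d + 1)).mp this with ⟨r, hr, h1, h2⟩
          rcases List.mem_cons.mp hr with rfl | hr'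
          · omega
          · have := pvNorm_cov_tail_ge M' a d (d + 1) hM ⟨r, hr', h1, h2⟩; omega
      subst hbd
      have htails : ∀ x, covP x L' ↔ covP x M' := by
        intro x
        constructor
        · intro hx
          have hge := pvNorm_cov_tail_ge L' a b x hL hx
          rcases hx with ⟨r, hr, h1, h2⟩
          rcases (hcov x).mp ⟨r, List.mem_cons_of_mem _ hr, h1, h2⟩ with ⟨s, hs, h3, h4⟩
          rcases List.mem_cons.mp hs with rfl | hs'
          · omega
          · exact ⟨s, hs', h3, h4⟩
        · intro hx
          have hge := pvNorm_cov_tail_ge M' a b x hM hx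
          rcases hx with ⟨r, hr, h1, h2⟩
          rcases (hcov x).mpr ⟨r, List.mem_cons_of_mem _ hr, h1, h2⟩ with ⟨s, hs, h3, h4⟩
          rcases List.mem_cons.mp hs with rfl | hs'
          · omega
          · exact ⟨s, hs', h3, h4⟩
      rw [ih M' (pvNorm_tail hL) (pvNorm_tail hM) htails]

-- the merge recursion both ports' loops compute
def mergeGo : Int × Int → List (Int × Int) → List (Int × Int)
  | c, [] => [c]
  | c, q :: t => if q.1 ≤ c.2 + 1 then mergeGo (c.1, max c.2 q.2) t else c :: mergeGo q t

theorem mergeGo_head : ∀ (l : List (Int × Int)) (c : Int × Int),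
    ∃ e t', mergeGo c l = (c.1, e) :: t' := by
  intro l
  induction l with
  | nil => intro c; exact ⟨c.2, [], rfl⟩
  | cons q t ih =>
    intro c
    unfold mergeGo
    split
    · obtain ⟨e, t', h⟩ := ih (c.1, max c.2 q.2)
      exact ⟨e, t', h⟩
    · exact ⟨c.2, mergeGo q t, rfl⟩

theorem mergeGo_spec : ∀ (rest : List (Int × Int)) (c : Int × Int),
    c.1 ≤ c.2 → (∀ p ∈ rest, p.1 ≤ p.2) →
    (c :: rest).Pairwise (fun p q => p.1 ≤ q.1) →
    pvNorm (mergeGo c rest) ∧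
      ∀ x, covP x (mergeGo c rest) ↔ (c.1 ≤ x ∧ x ≤ c.2) ∨ covP x rest := by
  intro rest
  induction rest with
  | nil =>
    intro c hc _ _
    constructor
    · exact ⟨by intro p hp; simp [mergeGo] at hp; subst hp; exact hc, by simp [mergeGo]⟩
    · intro x; simp [mergeGo, covP_cons, covP_nil]
  | cons q t ih =>
    intro c hc hne hpw
    have hq : q.1 ≤ q.2 := hne q (by simp)
    rcases List.pairwise_cons.mp hpw with ⟨hhead, hpw'⟩
    rcases List.pairwise_cons.mp hpw' with ⟨hqt, hpwt⟩
    have hcq : c.1 ≤ q.1 := hhead q (by simp)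
    by_cases hbr : q.1 ≤ c.2 + 1
    · have hm : mergeGo c (q :: t) = mergeGo (c.1, max c.2 q.2) t := by
        simp only [mergeGo, if_pos hbr]
      have hrec := ih (c.1, max c.2 q.2) (by simp; omega)
        (fun p hp => hne p (List.mem_cons_of_mem _ hp))
        (List.pairwise_cons.mpr ⟨fun r hr => by have := hqt r hr; simp; omega, hpwt⟩)
      constructor
      · rw [hm]; exact hrec.1
      · intro x
        rw [hm, hrec.2 x, covP_cons]
        constructor
        · rintro (⟨h1, h2⟩ | h)
          · simp only at h1 h2
            by_cases hx : x ≤ c.2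
            · exact Or.inl ⟨h1, hx⟩
            · exact Or.inr (Or.inl ⟨by omega, by omega⟩)
          · exact Or.inr (Or.inr h)
        · rintro (⟨h1, h2⟩ | ⟨h1, h2⟩ | h)
          · exact Or.inl ⟨h1, by simp; omega⟩
          · exact Or.inl ⟨by omega, by simp; omega⟩
          · exact Or.inr h
    · have hm : mergeGo c (q :: t) = c :: mergeGo q t := by
        simp only [mergeGo, if_neg hbr]
      have hrec := ih q hq (fun p hp => hne p (List.mem_cons_of_mem _ hp)) hpw'
      constructor
      · rw [hm]
        refine ⟨?_, ?_⟩
        · intro p hp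
          rcases List.mem_cons.mp hp with rfl | hp'
          · exact hc
          · exact hrec.1.1 p hp'
        · obtain ⟨e', t', hhd⟩ := mergeGo_head t q
          refine List.IsChain.cons hrec.1.2 ?_
          intro y hy
          rw [hhd] at hy
          simp at hy
          subst hy
          simp
          omega
      · intro x
        rw [hm]
        simp only [covP_cons, hrec.2 x]

-- A's merge loop is mergeGo
theorem foldl_stepA : ∀ (rest acc : List (Int × Int)) (c : Int × Int),
    List.foldl pvStepA (acc ++ [c]) rest = acc ++ mergeGo c rest := by
  intro rest
  induction rest with
  | nil => intro acc c; simp [mergeGo]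
  | cons q t ih =>
    intro acc c
    simp only [List.foldl_cons]
    by_cases hbr : q.1 ≤ c.2 + 1
    · have hstep : pvStepA (acc ++ [c]) q = acc ++ [(c.1, max c.2 q.2)] := by
        simp [pvStepA, hbr]
      rw [hstep, ih]
      have : mergeGo c (q :: t) = mergeGo (c.1, max c.2 q.2) t := by
        simp only [mergeGo, if_pos hbr]
      rw [this]
    · have hstep : pvStepA (acc ++ [c]) q = (acc ++ [c]) ++ [q] := by
        simp [pvStepA, hbr]
      rw [hstep]
      have h2 := ih (acc ++ [c]) q
      have h3 : mergeGo c (q :: t) = c :: mergeGo q t := by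
        simp only [mergeGo, if_neg hbr]
      rw [h2, h3]
      simp

-- B's merge loop agrees with A's on a non-empty accumulator
theorem stepB_concat (acc : List (Int × Int)) (c q : Int × Int) :
    pvStepB (acc ++ [c]) q = pvStepA (acc ++ [c]) q := by
  unfold pvStepB pvStepA
  rw [List.getLast?_concat]
  simp

theorem foldl_stepB : ∀ (rest acc : List (Int × Int)) (c : Int × Int),
    List.foldl pvStepB (acc ++ [c]) rest = acc ++ mergeGo c rest := by
  intro rest
  induction rest with
  | nil => intro acc c; simp [mergeGo]
  | cons q t ih =>
    intro acc c
    simp only [List.foldl_cons]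
    rw [stepB_concat]
    by_cases hbr : q.1 ≤ c.2 + 1
    · have hstep : pvStepA (acc ++ [c]) q = acc ++ [(c.1, max c.2 q.2)] := by
        simp [pvStepA, hbr]
      rw [hstep, ih]
      have : mergeGo c (q :: t) = mergeGo (c.1, max c.2 q.2) t := by
        simp only [mergeGo, if_pos hbr]
      rw [this]
    · have hstep : pvStepA (acc ++ [c]) q = (acc ++ [c]) ++ [q] := by
        simp [pvStepA, hbr]
      rw [hstep]
      have h2 := ih (acc ++ [c]) q
      have h3 : mergeGo c (q :: t) = c :: mergeGo q t := by
        simp only [mergeGo, if_neg hbr]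
      rw [h2, h3]
      simp

-- Python's default tuple comparison used by both sorts
def pvBefore (p q : Int × Int) : Bool :=
  decide (p.1 < q.1) || (!decide (q.1 < p.1) && decide (p.2 < q.2))

def Rlex (p q : Int × Int) : Prop := p.1 < q.1 ∨ (p.1 = q.1 ∧ p.2 ≤ q.2)

theorem pvBefore_false_iff (p q : Int × Int) : pvBefore q p = false ↔ Rlex p q := by
  simp [pvBefore, Rlex]; omega

theorem pvBefore_true_imp {p q : Int × Int} (h : pvBefore p q = true) : Rlex p q := by
  simp [pvBefore, Rlex] at *; omega

theorem Rlex_trans {p q r : Int × Int} (h1 : Rlex p q) (h2 : Rlex q r) : Rlex p r := by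
  unfold Rlex at *; omega

theorem insertBy_pairwise : ∀ (ys : List (Int × Int)) (x : Int × Int),
    ys.Pairwise Rlex → (PySem.List.insertBy pvBefore x ys).Pairwise Rlex := by
  intro ys
  induction ys with
  | nil => intro x _; simp [PySem.List.insertBy]
  | cons y ys ih =>
    intro x hp
    rcases List.pairwise_cons.mp hp with ⟨hy, hys⟩
    by_cases hb : pvBefore x y = true
    · have : PySem.List.insertBy pvBefore x (y :: ys) = x :: y :: ys := by
        simp [PySem.List.insertBy, hb]
      rw [this]
      refine List.pairwise_cons.mpr ⟨?_, hp⟩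
      intro z hz
      rcases List.mem_cons.mp hz with rfl | hz'
      · exact pvBefore_true_imp hb
      · exact Rlex_trans (pvBefore_true_imp hb) (hy z hz')
    · have : PySem.List.insertBy pvBefore x (y :: ys) = y :: PySem.List.insertBy pvBefore x ys := by
        simp [PySem.List.insertBy, hb]
      rw [this]
      refine List.pairwise_cons.mpr ⟨?_, ih x hys⟩
      intro z hz
      rcases (PySem.List.mem_insertBy pvBefore x z ys).mp hz with rfl | hz'
      · exact (pvBefore_false_iff y z).mp (by simpa using hb)
      · exact hy z hz'

theorem foldl_insertBy_pairwise : ∀ (xs acc : List (Int × Int)),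
    acc.Pairwise Rlex →
    (xs.foldl (fun acc x => PySem.List.insertBy pvBefore x acc) acc).Pairwise Rlex := by
  intro xs
  induction xs with
  | nil => intro acc h; exact h
  | cons x t ih =>
    intro acc h
    simp only [List.foldl_cons]
    exact ih _ (insertBy_pairwise acc x h)

theorem sorted2_eq (xs : List (Int × Int)) :
    PySem.List.sorted2 xs Prod.fst Prod.snd =
      xs.foldl (fun acc x => PySem.List.insertBy pvBefore x acc) [] := rfl

theorem sorted2_pairwise_fst (xs : List (Int × Int)) :
    (PySem.List.sorted2 xs Prod.fst Prod.snd).Pairwise (fun p q : Int × Int => p.1 ≤ q.1) := by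
  rw [sorted2_eq]
  exact (foldl_insertBy_pairwise xs [] (by simp)).imp (fun h => by unfold Rlex at h; omega)

-- "sort then merge" computes the normal form
def pvMerge (L : List (Int × Int)) : List (Int × Int) :=
  match PySem.List.sorted2 L Prod.fst Prod.snd with
  | [] => []
  | c :: rest => mergeGo c rest

theorem pvMerge_spec (L : List (Int × Int)) (hne : ∀ p ∈ L, p.1 ≤ p.2) :
    pvNorm (pvMerge L) ∧ ∀ x, covP x (pvMerge L) ↔ covP x L := by
  have hperm := PySem.List.sorted2_perm L Prod.fst Prod.snd false
  have hpw := sorted2_pairwise_fst L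
  unfold pvMerge
  cases h : PySem.List.sorted2 L Prod.fst Prod.snd with
  | nil =>
    rw [h] at hperm
    have : L = [] := hperm.symm.eq_nil
    subst this
    exact ⟨pvNorm_nil, fun x => Iff.rfl⟩
  | cons c rest =>
    rw [h] at hperm hpw
    have hne' : ∀ p ∈ c :: rest, p.1 ≤ p.2 := fun p hp => hne p (hperm.mem_iff.mp hp)
    have hres := mergeGo_spec rest c (hne' c (by simp))
      (fun p hp => hne' p (List.mem_cons_of_mem _ hp)) hpw
    refine ⟨hres.1, fun x => ?_⟩
    rw [hres.2 x, ← covP_cons, covP_perm hperm]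

-- A's port is pvMerge of the pairwise intersections
theorem A_eq (S T : List (Int × Int)) :
    find_overlapping_hunks S T = pvMerge (pvPairs S T) := by
  have hA : find_overlapping_hunks S T =
      match PySem.List.sorted2 (pvPairs S T) Prod.fst Prod.snd with
      | [] => []
      | r0 :: rest => List.foldl pvStepA [r0] rest := rfl
  rw [hA]
  unfold pvMerge
  cases PySem.List.sorted2 (pvPairs S T) Prod.fst Prod.snd with
  | nil => rfl
  | cons c rest =>
    show List.foldl pvStepA [c] rest = mergeGo c rest
    have := foldl_stepA rest [] c
    simpa using this

-- B's coverage is pvMerge of the non-empty hunks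
theorem coverage_eq (H : List (Int × Int)) :
    pvCoverage H = pvMerge (H.filter (fun p => p.1 ≤ p.2)) := by
  have hC : pvCoverage H =
      (PySem.List.sorted2 (H.filter (fun p => p.1 ≤ p.2)) Prod.fst Prod.snd).foldl pvStepB [] := rfl
  rw [hC]
  unfold pvMerge
  cases PySem.List.sorted2 (H.filter (fun p => p.1 ≤ p.2)) Prod.fst Prod.snd with
  | nil => rfl
  | cons c rest =>
    simp only [List.foldl_cons]
    have h0 : pvStepB [] c = [c] := rfl
    rw [h0]
    have := foldl_stepB rest [] c
    simpa using this

theorem coverage_spec (H : List (Int × Int)) :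
    pvNorm (pvCoverage H) ∧ ∀ x, covP x (pvCoverage H) ↔ covP x H := by
  rw [coverage_eq]
  have hres := pvMerge_spec (H.filter (fun p => p.1 ≤ p.2))
    (fun p hp => by have := (List.mem_filter.mp hp).2; simpa using this)
  exact ⟨hres.1, fun x => (hres.2 x).trans (covP_filter H x)⟩

-- the pairwise-intersection list in flatMap form
theorem pvPairs_eq (S T : List (Int × Int)) :
    pvPairs S T = S.flatMap (fun p =>
      (T.filter (fun q => decide (max p.1 q.1 ≤ min p.2 q.2))).map
        (fun q => (max p.1 q.1, min p.2 q.2))) := by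
  unfold pvPairs
  have hinner : ∀ (p : Int × Int) (acc : List (Int × Int)),
      T.foldl (fun acc2 q =>
        let overlap_start := max p.1 q.1
        let overlap_end := min p.2 q.2
        if overlap_start ≤ overlap_end then acc2 ++ [(overlap_start, overlap_end)] else acc2) acc
      = acc ++ (T.filter (fun q => decide (max p.1 q.1 ≤ min p.2 q.2))).map
          (fun q => (max p.1 q.1, min p.2 q.2)) := by
    intro p acc
    have := PySem.List.foldl_append_if (fun q : Int × Int => decide (max p.1 q.1 ≤ min p.2 q.2))
      (fun q : Int × Int => (max p.1 q.1, min p.2 q.2)) T acc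
    rw [← this]
    congr 1
    funext acc2 q
    simp
  calc S.foldl (fun acc p => T.foldl _ acc) []
      = S.foldl (fun acc p => acc ++ (T.filter (fun q => decide (max p.1 q.1 ≤ min p.2 q.2))).map
          (fun q => (max p.1 q.1, min p.2 q.2))) [] := by
        congr 1
        funext acc p
        exact hinner p acc
    _ = _ := by
        rw [PySem.List.foldl_append_eq_flatMap]
        simp

theorem pvPairs_nonempty (S T : List (Int × Int)) :
    ∀ p ∈ pvPairs S T, p.1 ≤ p.2 := by
  intro p hp
  rw [pvPairs_eq] at hp
  rcases List.mem_flatMap.mp hp with ⟨r, _, hr⟩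
  rcases List.mem_map.mp hr with ⟨q, hq, rfl⟩
  have := (List.mem_filter.mp hq).2
  simpa using this

theorem covP_pvPairs (S T : List (Int × Int)) (x : Int) :
    covP x (pvPairs S T) ↔ covP x S ∧ covP x T := by
  rw [pvPairs_eq]
  constructor
  · rintro ⟨p, hp, h1, h2⟩
    rcases List.mem_flatMap.mp hp with ⟨r, hrS, hr⟩
    rcases List.mem_map.mp hr with ⟨q, hq, rfl⟩
    have hqT := (List.mem_filter.mp hq).1
    simp only at h1 h2
    exact ⟨⟨r, hrS, by omega⟩, ⟨q, hqT, by omega⟩⟩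
  · rintro ⟨⟨r, hrS, hr1, hr2⟩, ⟨q, hqT, hq1, hq2⟩⟩
    refine ⟨(max r.1 q.1, min r.2 q.2), ?_, by simp; omega, by simp; omega⟩
    exact List.mem_flatMap.mpr ⟨r, hrS,
      List.mem_map.mpr ⟨q, List.mem_filter.mpr ⟨hqT, by simp; omega⟩, rfl⟩⟩

-- the two-pointer sweep intersects two normal lists
theorem sweep_spec_aux : ∀ (n : Nat) (X Y : List (Int × Int)),
    X.length + Y.length ≤ n → pvNorm X → pvNorm Y →
    pvNorm (pvSweep X Y) ∧ ∀ x, covP x (pvSweep X Y) ↔ covP x X ∧ covP x Y := by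
  intro n
  induction n with
  | zero =>
    intro X Y hlen _ _
    have hX : X = [] := by cases X <;> simp_all
    have hY : Y = [] := by cases Y <;> simp_all
    subst hX; subst hY
    rw [pvSweep]
    exact ⟨pvNorm_nil, fun x => by simp [covP_nil]⟩
  | succ n ih =>
    intro X Y hlen hX hY
    match X, Y with
    | [], Y =>
      rw [pvSweep]
      exact ⟨pvNorm_nil, fun x => by simp [covP_nil]⟩
    | (p :: X'), [] =>
      rw [pvSweep]
      exact ⟨pvNorm_nil, fun x => by simp [covP_nil]⟩
    | ((a, b) :: S), ((c, d) :: T) =>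
      have hab : a ≤ b := hX.1 (a, b) (by simp)
      have hcd : c ≤ d := hY.1 (c, d) (by simp)
      rw [pvSweep]
      by_cases hbd : b < d
      · rw [if_pos hbd]
        have hrec := ih S ((c, d) :: T) (by simp at hlen ⊢; omega) (pvNorm_tail hX) hY
        have hge : ∀ x, covP x (pvSweep S ((c, d) :: T)) → b + 2 ≤ x := by
          intro x hx
          exact pvNorm_cov_tail_ge S a b x hX ((hrec.2 x).mp hx).1
        by_cases hse : max a c ≤ min b d
        · rw [if_pos hse]
          constructor
          · refine ⟨?_, ?_⟩
            · intro p hp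
              rcases List.mem_cons.mp hp with rfl | hp'
              · simpa using hse
              · exact hrec.1.1 p hp'
            · refine List.IsChain.cons hrec.1.2 ?_
              intro y hy
              have hymem : y ∈ pvSweep S ((c, d) :: T) := List.mem_of_mem_head? hy
              have hy12 : y.1 ≤ y.2 := hrec.1.1 y hymem
              have := hge y.1 ⟨y, hymem, le_refl _, hy12⟩
              simp
              omega
          · intro x
            rw [covP_cons, hrec.2 x, covP_cons, covP_cons]
            constructor
            · rintro (⟨h1, h2⟩ | ⟨hS', hY'⟩)
              · exact ⟨Or.inl ⟨by omega, by omega⟩, Or.inl ⟨by omega, by omega⟩⟩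
              · exact ⟨Or.inr hS', hY'⟩
            · rintro ⟨h1, h2⟩
              rcases h1 with ⟨ha, hb⟩ | hS'
              · rcases h2 with ⟨hc, hd⟩ | hT'
                · exact Or.inl ⟨by omega, by omega⟩
                · have := pvNorm_cov_tail_ge T c d x hY hT'
                  omega
              · exact Or.inr ⟨hS', h2⟩
        · rw [if_neg hse]
          refine ⟨hrec.1, fun x => ?_⟩
          rw [hrec.2 x, covP_cons, covP_cons]
          constructor
          · rintro ⟨hS', hY'⟩
            exact ⟨Or.inr hS', hY'⟩
          · rintro ⟨h1, h2⟩
            rcases h1 with ⟨ha, hb⟩ | hS'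
            · rcases h2 with ⟨hc, hd⟩ | hT'
              · omega
              · have := pvNorm_cov_tail_ge T c d x hY hT'
                omega
            · exact ⟨hS', h2⟩
      · rw [if_neg hbd]
        have hrec := ih ((a, b) :: S) T (by simp at hlen ⊢; omega) hX (pvNorm_tail hY)
        have hge : ∀ x, covP x (pvSweep ((a, b) :: S) T) → d + 2 ≤ x := by
          intro x hx
          exact pvNorm_cov_tail_ge T c d x hY ((hrec.2 x).mp hx).2
        by_cases hse : max a c ≤ min b d
        · rw [if_pos hse]
          constructor
          · refine ⟨?_, ?_⟩
            · intro p hp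
              rcases List.mem_cons.mp hp with rfl | hp'
              · simpa using hse
              · exact hrec.1.1 p hp'
            · refine List.IsChain.cons hrec.1.2 ?_
              intro y hy
              have hymem : y ∈ pvSweep ((a, b) :: S) T := List.mem_of_mem_head? hy
              have hy12 : y.1 ≤ y.2 := hrec.1.1 y hymem
              have := hge y.1 ⟨y, hymem, le_refl _, hy12⟩
              simp
              omega
          · intro x
            rw [covP_cons, hrec.2 x, covP_cons, covP_cons]
            constructor
            · rintro (⟨h1, h2⟩ | ⟨hX', hT'⟩)
              · exact ⟨Or.inl ⟨by omega, by omega⟩, Or.inl ⟨by omega, by omega⟩⟩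
              · exact ⟨hX', Or.inr hT'⟩
            · rintro ⟨h1, h2⟩
              rcases h2 with ⟨hc, hd⟩ | hT'
              · rcases h1 with ⟨ha, hb⟩ | hS'
                · exact Or.inl ⟨by omega, by omega⟩
                · have := pvNorm_cov_tail_ge S a b x hX hS'
                  omega
              · exact Or.inr ⟨h1, hT'⟩
        · rw [if_neg hse]
          refine ⟨hrec.1, fun x => ?_⟩
          rw [hrec.2 x, covP_cons, covP_cons]
          constructor
          · rintro ⟨hX', hT'⟩
            exact ⟨hX', Or.inr hT'⟩
          · rintro ⟨h1, h2⟩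
            rcases h2 with ⟨hc, hd⟩ | hT'
            · rcases h1 with ⟨ha, hb⟩ | hS'
              · omega
              · have := pvNorm_cov_tail_ge S a b x hX hS'
                omega
            · exact ⟨h1, hT'⟩

theorem sweep_spec (X Y : List (Int × Int)) (hX : pvNorm X) (hY : pvNorm Y) :
    pvNorm (pvSweep X Y) ∧ ∀ x, covP x (pvSweep X Y) ↔ covP x X ∧ covP x Y :=
  sweep_spec_aux (X.length + Y.length) X Y (le_refl _) hX hY

-- ===== VERDICT (by name: the statement is the Claim_ definition above) =====
theorem find_overlapping_hunks_spec : Claim_equal_find_overlapping_hunks := by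
  intro S T _
  unfold Spec_find_overlapping_hunks find_overlapping_hunks_alt
  have hAspec := pvMerge_spec (pvPairs S T) (pvPairs_nonempty S T)
  have hcovS := coverage_spec S
  have hcovT := coverage_spec T
  have hB := sweep_spec (pvCoverage S) (pvCoverage T) hcovS.1 hcovT.1
  rw [A_eq]
  refine pvNorm_unique _ _ hAspec.1 hB.1 (fun x => ?_)
  rw [hAspec.2 x, covP_pvPairs, hB.2 x, hcovS.2 x, hcovT.2 x]
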